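-- pv_equiv track=rewrite | github.com/danideveloping/fds-exercises | fds-exercise-1/template/task1/main.py | compute_vector_clocks
-- ===== SOURCE A (Python) =====
-- from typing import Dict, List, Tuple, Set
--
-- BranchIndex = Dict[str, int]
--
-- CommitToBranch = Dict[str, str]
--
-- CommitToParents = Dict[str, List[str]]
--
-- Clock = List[int]
--
-- CommitToClock = Dict[str, Clock]
--
-- def elementwise_max(vectors: List[Clock]) -> Clock:
--     if not vectors:
--         return []
--     length = len(vectors[0])
--     result = [0] * length
--     for vec in vectors:
--         for i in range(length):
--             if vec[i] > result[i]:
--                 result[i] = vec[i]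
--     return result
--
-- def compute_vector_clocks(
--     branch_to_index: BranchIndex,
--     commit_to_branch: CommitToBranch,
--     commit_to_parents: CommitToParents,
-- ) -> CommitToClock:
--     num_processes = len(branch_to_index)
--     memo: CommitToClock = {}
--
--     def clock_of(commit: str) -> Clock:
--         if commit in memo:
--             return memo[commit]
--         branch = commit_to_branch[commit]
--         proc_index = branch_to_index[branch]
--         parents = commit_to_parents.get(commit, [])
--         if not parents:
--             v = [0] * num_processes
--             v[proc_index] += 1
--             memo[commit] = v
--             return v
--         parent_clocks = [clock_of(p) for p in parents]
--         v = elementwise_max(parent_clocks)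
--         if len(v) == 0:
--             v = [0] * num_processes
--         v[proc_index] += 1
--         memo[commit] = v
--         return v
--
--     for commit in commit_to_branch.keys():
--         clock_of(commit)
--
--     return memo
-- ===== SOURCE B (Python) =====
-- def compute_vector_clocks(branch_to_index, commit_to_branch, commit_to_parents):
--     num_processes = len(branch_to_index)
--
--     # Phase 1: DFS post-order over the parent DAG = a topological order
--     # (every parent precedes its child), visiting roots in key order.
--     order = []
--
--     def visit(commit):
--         if commit in order:
--             return
--         for parent in commit_to_parents.get(commit, []):
--             visit(parent)
--         order.append(commit)
--
--     for commit in commit_to_branch: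
--         visit(commit)
--
--     # Phase 2: one linear pass in topological order; each clock is the
--     # pairwise elementwise max of the already-finished parent clocks.
--     clocks = {}
--     for commit in order:
--         v = [0] * num_processes
--         for parent in commit_to_parents.get(commit, []):
--             v = [max(x, y) for x, y in zip(v, clocks[parent])]
--         v[branch_to_index[commit_to_branch[commit]]] += 1
--         clocks[commit] = v
--     return clocks
-- ===== Notes on version B (the rewrite author's own statement) =====
-- stated objective: alternative
-- what changed: A interleaves the clock computation with a memoized recursive DFS (elementwise_max over a list of parent clocks inside the recursion); B first runs an order-only DFS to produce a topological order of the commits and then computes all clocks in one separate linear pass, folding zip/max over the already-finished parent clocks.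
import Mathlib
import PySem

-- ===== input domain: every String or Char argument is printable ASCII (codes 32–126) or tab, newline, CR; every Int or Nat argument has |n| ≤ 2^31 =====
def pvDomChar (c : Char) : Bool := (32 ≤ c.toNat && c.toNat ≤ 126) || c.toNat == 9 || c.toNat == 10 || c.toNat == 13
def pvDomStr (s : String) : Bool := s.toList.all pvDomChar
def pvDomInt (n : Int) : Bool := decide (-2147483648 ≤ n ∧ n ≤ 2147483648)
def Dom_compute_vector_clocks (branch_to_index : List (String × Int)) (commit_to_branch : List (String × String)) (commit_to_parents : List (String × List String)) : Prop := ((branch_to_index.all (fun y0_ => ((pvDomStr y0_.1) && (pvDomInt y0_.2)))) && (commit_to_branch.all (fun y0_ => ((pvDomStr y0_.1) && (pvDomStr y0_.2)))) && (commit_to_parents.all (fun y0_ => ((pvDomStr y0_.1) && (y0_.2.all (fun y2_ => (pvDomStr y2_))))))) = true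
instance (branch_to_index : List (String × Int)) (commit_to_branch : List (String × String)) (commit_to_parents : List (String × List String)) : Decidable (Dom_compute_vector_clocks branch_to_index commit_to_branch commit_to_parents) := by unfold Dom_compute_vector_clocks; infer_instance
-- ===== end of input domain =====

-- B replaces A's memoized recursion (clocks computed inside the DFS) by two phases: an
-- order-only DFS producing a topological order, then one linear pass computing each clock
-- as a zip/max fold over the already-finished parent clocks (objective: alternative).

-- ===== PORT A =====
-- literal port of elementwise_max
def pvEmax (vectors : List (List Int)) : List Int :=
  if vectors = [] then []
  else
    let length : Int := PySem.List.len (PySem.List.pyGetD vectors 0 [])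
    vectors.foldl (fun result vec =>
      (PySem.List.pyRange 0 length 1).foldl (fun result i =>
        if PySem.List.pyGetD vec i 0 > PySem.List.pyGetD result i 0 then
          PySem.List.pySetD result i (PySem.List.pyGetD vec i 0)
        else result) result)
      (List.replicate length.toNat 0)

-- literal port of the inner `clock_of` (fuel models Python's recursion stack; inside
-- Pre_ the DAG depth is below the fuel, and Python raises RecursionError on cycles)
def pvClockA (dc : PySem.Dict String String) (db : PySem.Dict String Int)
    (dp : PySem.Dict String (List String)) (n : Int) :
    Nat → PySem.Dict String (List Int) → String → Option (PySem.Dict String (List Int) × List Int)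
  | 0, _, _ => none
  | fuel+1, memo, c =>
    match memo.get? c with
    | some v => some (memo, v)
    | none =>
      let branch := dc.getD c ""
      let idx := db.getD branch 0
      let parents := dp.getD c []
      if parents = [] then
        let v0 : List Int := List.replicate n.toNat 0
        let v := PySem.List.pySetD v0 idx (PySem.List.pyGetD v0 idx 0 + 1)
        some (memo.insert c v, v)
      else
        match parents.foldl
            (fun acc p => acc.bind fun mv =>
              (pvClockA dc db dp n fuel mv.1 p).map fun r => (r.1, mv.2 ++ [r.2]))
            (some (memo, ([] : List (List Int)))) with
        | none => none
        | some (memo', pcs) =>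
          let v0 := pvEmax pcs
          let v1 := if PySem.List.len v0 = 0 then List.replicate n.toNat 0 else v0
          let v := PySem.List.pySetD v1 idx (PySem.List.pyGetD v1 idx 0 + 1)
          some (memo'.insert c v, v)

def compute_vector_clocks (branch_to_index : List (String × Int)) (commit_to_branch : List (String × String)) (commit_to_parents : List (String × List String)) : List (String × List Int) :=
  let db := PySem.Dict.ofList branch_to_index
  let dc := PySem.Dict.ofList commit_to_branch
  let dp := PySem.Dict.ofList commit_to_parents
  let n : Int := (db.size : Int)
  match dc.keys.foldl
      (fun acc c => acc.bind fun memo => (pvClockA dc db dp n (dc.size + 1) memo c).map Prod.fst)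
      (some PySem.Dict.empty) with
  | none => []
  | some memo => memo.items

-- ===== PORT B =====
-- phase 1: order-only DFS post-order (same fuel device for the recursion)
def pvDfs (dp : PySem.Dict String (List String)) :
    Nat → List String → String → Option (List String)
  | 0, _, _ => none
  | fuel+1, order, c =>
    if c ∈ order then some order
    else
      match (dp.getD c []).foldl (fun acc p => acc.bind fun o => pvDfs dp fuel o p)
          (some order) with
      | none => none
      | some o => some (o ++ [c])

-- phase 2: the clock of one commit from the finished parent clocks
def pvVal (dc : PySem.Dict String String) (db : PySem.Dict String Int)
    (dp : PySem.Dict String (List String)) (n : Int)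
    (clocks : PySem.Dict String (List Int)) (c : String) : List Int :=
  let v := (dp.getD c []).foldl (fun v p => List.zipWith max v (clocks.getD p []))
    (List.replicate n.toNat (0 : Int))
  let idx := db.getD (dc.getD c "") 0
  PySem.List.pySetD v idx (PySem.List.pyGetD v idx 0 + 1)

def pvStepClock (dc : PySem.Dict String String) (db : PySem.Dict String Int)
    (dp : PySem.Dict String (List String)) (n : Int)
    (clocks : PySem.Dict String (List Int)) (c : String) : PySem.Dict String (List Int) :=
  clocks.insert c (pvVal dc db dp n clocks c)

def compute_vector_clocks_alt (branch_to_index : List (String × Int)) (commit_to_branch : List (String × String)) (commit_to_parents : List (String × List String)) : List (String × List Int) :=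
  let db := PySem.Dict.ofList branch_to_index
  let dc := PySem.Dict.ofList commit_to_branch
  let dp := PySem.Dict.ofList commit_to_parents
  let n : Int := (db.size : Int)
  match dc.keys.foldl (fun acc c => acc.bind fun o => pvDfs dp (dc.size + 1) o c)
      (some ([] : List String)) with
  | none => []
  | some order => (order.foldl (pvStepClock dc db dp n) PySem.Dict.empty).items

-- ===== PRECONDITION & SPEC =====
-- Pre_ admits exactly the inputs where Python A returns normally: every commit's branch is a
-- key of branch_to_index with an in-range (possibly negative, Python-wrapping) process index,
-- every parent of a commit is itself a commit of commit_to_branch (else KeyError), and no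
-- commit is an ancestor of itself (on a cycle A raises RecursionError).
def Pre_compute_vector_clocks (branch_to_index : List (String × Int)) (commit_to_branch : List (String × String)) (commit_to_parents : List (String × List String)) : Prop :=
  ∀ c ∈ (PySem.Dict.ofList commit_to_branch).keys,
    (PySem.Dict.ofList branch_to_index).contains
      ((PySem.Dict.ofList commit_to_branch).getD c "") = true ∧
    PySem.Raise.InRange (PySem.Dict.ofList branch_to_index).size
      ((PySem.Dict.ofList branch_to_index).getD
        ((PySem.Dict.ofList commit_to_branch).getD c "") 0) ∧
    (∀ p ∈ (PySem.Dict.ofList commit_to_parents).getD c [],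
      (PySem.Dict.ofList commit_to_branch).contains p = true) ∧
    c ∉ (fun S => PySem.Set.update S
      (S.flatMap fun x => (PySem.Dict.ofList commit_to_parents).getD x []))^[(PySem.Dict.ofList commit_to_branch).size]
      ((PySem.Dict.ofList commit_to_parents).getD c [])
instance (branch_to_index : List (String × Int)) (commit_to_branch : List (String × String)) (commit_to_parents : List (String × List String)) : Decidable (Pre_compute_vector_clocks branch_to_index commit_to_branch commit_to_parents) := by unfold Pre_compute_vector_clocks; infer_instance

def pvWitness_compute_vector_clocks : (List (String × Int)) × (List (String × String)) × (List (String × List String)) :=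
  ([("main", 0), ("dev", 1)], [("a", "main"), ("b", "dev"), ("c", "main")], [("b", ["a"]), ("c", ["a", "b"])])

def Spec_compute_vector_clocks (branch_to_index : List (String × Int)) (commit_to_branch : List (String × String)) (commit_to_parents : List (String × List String)) (out : List (String × List Int)) : Prop := out = compute_vector_clocks_alt branch_to_index commit_to_branch commit_to_parents
instance (branch_to_index : List (String × Int)) (commit_to_branch : List (String × String)) (commit_to_parents : List (String × List String)) (out : List (String × List Int)) : Decidable (Spec_compute_vector_clocks branch_to_index commit_to_branch commit_to_parents out) := by unfold Spec_compute_vector_clocks; infer_instance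

-- ===== CLAIM (what is proved, stated in full; the proofs are below) =====
def Claim_equal_compute_vector_clocks : Prop := ∀ (branch_to_index : List (String × Int)) (commit_to_branch : List (String × String)) (commit_to_parents : List (String × List String)), Dom_compute_vector_clocks branch_to_index commit_to_branch commit_to_parents → Pre_compute_vector_clocks branch_to_index commit_to_branch commit_to_parents → Spec_compute_vector_clocks branch_to_index commit_to_branch commit_to_parents (compute_vector_clocks branch_to_index commit_to_branch commit_to_parents)

-- ===== LEMMAS AND PROOFS =====

-- fold abbreviations for the two recursions (definitionally the folds inside the ports)
def pvDfsFold (dp : PySem.Dict String (List String)) (fuel : Nat) (ps : List String)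
    (acc : Option (List String)) : Option (List String) :=
  ps.foldl (fun acc p => acc.bind fun o => pvDfs dp fuel o p) acc

def pvAFold (dc : PySem.Dict String String) (db : PySem.Dict String Int)
    (dp : PySem.Dict String (List String)) (n : Int) (fuel : Nat) (ps : List String)
    (acc : Option (PySem.Dict String (List Int) × List (List Int))) :
    Option (PySem.Dict String (List Int) × List (List Int)) :=
  ps.foldl (fun acc p => acc.bind fun mv =>
    (pvClockA dc db dp n fuel mv.1 p).map fun r => (r.1, mv.2 ++ [r.2])) acc

theorem pvDfs_succ (dp : PySem.Dict String (List String)) (fuel : Nat) (order : List String)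
    (c : String) :
    pvDfs dp (fuel+1) order c =
      if c ∈ order then some order
      else match pvDfsFold dp fuel (dp.getD c []) (some order) with
        | none => none
        | some o => some (o ++ [c]) := rfl

-- the two clock values A computes, named for the proofs
def pvBaseVal (dc : PySem.Dict String String) (db : PySem.Dict String Int) (n : Int)
    (c : String) : List Int :=
  PySem.List.pySetD (List.replicate n.toNat 0) (db.getD (dc.getD c "") 0)
    (PySem.List.pyGetD (List.replicate n.toNat 0) (db.getD (dc.getD c "") 0) 0 + 1)

def pvMaxVal (dc : PySem.Dict String String) (db : PySem.Dict String Int) (n : Int)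
    (c : String) (pcs : List (List Int)) : List Int :=
  let v1 := if PySem.List.len (pvEmax pcs) = 0 then List.replicate n.toNat 0 else pvEmax pcs
  PySem.List.pySetD v1 (db.getD (dc.getD c "") 0)
    (PySem.List.pyGetD v1 (db.getD (dc.getD c "") 0) 0 + 1)

theorem pvClockA_succ (dc : PySem.Dict String String) (db : PySem.Dict String Int)
    (dp : PySem.Dict String (List String)) (n : Int) (fuel : Nat)
    (memo : PySem.Dict String (List Int)) (c : String) :
    pvClockA dc db dp n (fuel+1) memo c =
      match memo.get? c with
      | some v => some (memo, v)
      | none =>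
        if dp.getD c [] = [] then
          some (memo.insert c (pvBaseVal dc db n c), pvBaseVal dc db n c)
        else
          match pvAFold dc db dp n fuel (dp.getD c []) (some (memo, [])) with
          | none => none
          | some (memo', pcs) =>
            some (memo'.insert c (pvMaxVal dc db n c pcs), pvMaxVal dc db n c pcs) := rfl

theorem pvDfsFold_none (dp : PySem.Dict String (List String)) (fuel : Nat) (ps : List String) :
    pvDfsFold dp fuel ps none = none := by
  induction ps with
  | nil => rfl
  | cons p ps ih => simpa [pvDfsFold] using ih

theorem pvAFold_none (dc : PySem.Dict String String) (db : PySem.Dict String Int)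
    (dp : PySem.Dict String (List String)) (n : Int) (fuel : Nat) (ps : List String) :
    pvAFold dc db dp n fuel ps none = none := by
  induction ps with
  | nil => rfl
  | cons p ps ih => simpa [pvAFold] using ih

theorem pvDfsFold_cons (dp : PySem.Dict String (List String)) (fuel : Nat) (p : String)
    (ps : List String) (order : List String) :
    pvDfsFold dp fuel (p :: ps) (some order) = pvDfsFold dp fuel ps (pvDfs dp fuel order p) := rfl

theorem pvAFold_cons (dc : PySem.Dict String String) (db : PySem.Dict String Int)
    (dp : PySem.Dict String (List String)) (n : Int) (fuel : Nat) (p : String) (ps : List String)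
    (memo : PySem.Dict String (List Int)) (vs : List (List Int)) :
    pvAFold dc db dp n fuel (p :: ps) (some (memo, vs)) =
      pvAFold dc db dp n fuel ps
        ((pvClockA dc db dp n fuel memo p).map fun r => (r.1, vs ++ [r.2])) := rfl

theorem pvDfs_mem_hit (dp : PySem.Dict String (List String)) (fuel : Nat) (order : List String)
    (c : String) (o : List String) (hc : c ∈ order) (h : pvDfs dp fuel order c = some o) :
    o = order := by
  cases fuel with
  | zero => exact absurd h (by simp [pvDfs])
  | succ fuel => rw [pvDfs_succ, if_pos hc] at h; exact (Option.some.inj h).symm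

-- a successful dfs call only extends the order list
theorem pvDfs_prefix (dp : PySem.Dict String (List String)) : ∀ (fuel : Nat),
    (∀ ps order o, pvDfsFold dp fuel ps (some order) = some o → order <+: o) ∧
    (∀ order c o, pvDfs dp fuel order c = some o → order <+: o) := by
  intro fuel
  induction fuel with
  | zero =>
    constructor
    · intro ps order o h
      induction ps with
      | nil => cases h; exact List.prefix_refl _
      | cons p ps ih =>
        rw [pvDfsFold_cons] at h
        simp only [pvDfs] at h
        rw [pvDfsFold_none] at h; cases h
    · intro order c o h; simp [pvDfs] at h
  | succ fuel ih =>
    have hdfs : ∀ order c o, pvDfs dp (fuel+1) order c = some o → order <+: o := by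
      intro order c o h
      rw [pvDfs_succ] at h
      by_cases hc : c ∈ order
      · rw [if_pos hc] at h; cases h; exact List.prefix_refl _
      · rw [if_neg hc] at h
        cases hfold : pvDfsFold dp fuel (dp.getD c []) (some order) with
        | none => rw [hfold] at h; cases h
        | some o2 =>
          rw [hfold] at h; cases h
          exact (ih.1 _ _ _ hfold).trans (List.prefix_append _ _)
    refine ⟨?_, hdfs⟩
    intro ps order o h
    induction ps generalizing order with
    | nil => cases h; exact List.prefix_refl _
    | cons p ps ihps =>
      rw [pvDfsFold_cons] at h
      cases hp : pvDfs dp (fuel+1) order p with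
      | none => rw [hp, pvDfsFold_none] at h; cases h
      | some o1 =>
        rw [hp] at h
        exact (hdfs _ _ _ hp).trans (ihps _ h)

-- parent walks: pvChain a l z holds when a → l₀ → … → z is a walk along parent edges
def pvChain (dp : PySem.Dict String (List String)) : String → List String → String → Prop
  | a, [], z => z ∈ dp.getD a []
  | a, m :: l, z => m ∈ dp.getD a [] ∧ pvChain dp m l z

-- every element a successful dfs call appends is reached from the argument by parent edges,
-- through nodes that were not yet in the order list
theorem pvDfs_reach (dp : PySem.Dict String (List String)) : ∀ (fuel : Nat),
    (∀ ps order o, pvDfsFold dp fuel ps (some order) = some o → ∀ x ∈ o, x ∈ order ∨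
      (x ∉ order ∧ ∃ p ∈ ps, p ∉ order ∧ (x = p ∨ ∃ l,
        pvChain dp p l x ∧ ∀ m ∈ l, m ∉ order))) ∧
    (∀ order c o, pvDfs dp fuel order c = some o → ∀ x ∈ o, x ∈ order ∨
      (x ∉ order ∧ (x = c ∨ ∃ l, pvChain dp c l x ∧ ∀ m ∈ l, m ∉ order))) := by
  intro fuel
  induction fuel with
  | zero =>
    constructor
    · intro ps order o h
      induction ps with
      | nil => cases h; intro x hx; exact Or.inl hx
      | cons p ps ih =>
        rw [pvDfsFold_cons] at h
        simp only [pvDfs] at h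
        rw [pvDfsFold_none] at h; cases h
    · intro order c o h; simp [pvDfs] at h
  | succ fuel ih =>
    have hdfs : ∀ order c o, pvDfs dp (fuel+1) order c = some o → ∀ x ∈ o, x ∈ order ∨
        (x ∉ order ∧ (x = c ∨ ∃ l, pvChain dp c l x ∧ ∀ m ∈ l, m ∉ order)) := by
      intro order c o h x hx
      rw [pvDfs_succ] at h
      by_cases hc : c ∈ order
      · rw [if_pos hc] at h; cases h; exact Or.inl hx
      · rw [if_neg hc] at h
        cases hfold : pvDfsFold dp fuel (dp.getD c []) (some order) with
        | none => rw [hfold] at h; cases h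
        | some o2 =>
          rw [hfold] at h; cases h
          rcases List.mem_append.1 hx with hx2 | hxc
          · rcases ih.1 _ _ _ hfold x hx2 with hord | ⟨hxo, p, hp, hpo, hcase⟩
            · exact Or.inl hord
            · refine Or.inr ⟨hxo, ?_⟩
              rcases hcase with rfl | ⟨l, hch, hl⟩
              · exact Or.inr ⟨[], hp, by simp⟩
              · refine Or.inr ⟨p :: l, ⟨hp, hch⟩, ?_⟩
                intro m hm
                rcases List.mem_cons.1 hm with rfl | hm
                · exact hpo
                · exact hl m hm
          · simp only [List.mem_singleton] at hxc
            exact Or.inr ⟨hxc ▸ hc, Or.inl hxc⟩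
    refine ⟨?_, hdfs⟩
    intro ps order o h
    induction ps generalizing order with
    | nil => cases h; intro x hx; exact Or.inl hx
    | cons p ps ihps =>
      rw [pvDfsFold_cons] at h
      cases hp : pvDfs dp (fuel+1) order p with
      | none => rw [hp, pvDfsFold_none] at h; cases h
      | some o1 =>
        rw [hp] at h
        have hpre : order <+: o1 := (pvDfs_prefix dp (fuel+1)).2 _ _ _ hp
        intro x hx
        rcases ihps _ h x hx with ho1 | ⟨hxo1, p', hp', hp'o1, hcase⟩
        · rcases hdfs _ _ _ hp x ho1 with hord | ⟨hxo, hcase⟩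
          · exact Or.inl hord
          · by_cases hpord : p ∈ order
            · rw [pvDfs_mem_hit dp (fuel+1) order p o1 hpord hp] at ho1
              exact Or.inl ho1
            · exact Or.inr ⟨hxo, p, List.mem_cons.2 (Or.inl rfl), hpord, hcase⟩
        · refine Or.inr ⟨fun hxo => hxo1 (hpre.subset hxo), p', List.mem_cons_of_mem _ hp',
            fun hcmem => hp'o1 (hpre.subset hcmem), ?_⟩
          rcases hcase with rfl | ⟨l, hch, hl⟩
          · exact Or.inl rfl
          · exact Or.inr ⟨l, hch, fun m hm hmo => hl m hm (hpre.subset hmo)⟩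

-- a dfs call never completes on, nor appends, a member of a cycle disjoint from the order list
theorem pvDfs_cyc (dp : PySem.Dict String (List String)) : ∀ (fuel : Nat),
    (∀ (ps order o S : List String), pvDfsFold dp fuel ps (some order) = some o →
      (∀ x ∈ S, ∃ y ∈ S, y ∈ dp.getD x []) → (∀ x ∈ S, x ∉ order) →
      (∀ p ∈ ps, p ∉ S) ∧ ∀ x ∈ S, x ∉ o) ∧
    (∀ (order : List String) (c : String) (o S : List String), pvDfs dp fuel order c = some o →
      (∀ x ∈ S, ∃ y ∈ S, y ∈ dp.getD x []) → (∀ x ∈ S, x ∉ order) →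
      c ∉ S ∧ ∀ x ∈ S, x ∉ o) := by
  intro fuel
  induction fuel with
  | zero =>
    constructor
    · intro ps order o S h hS hdisj
      cases ps with
      | nil => cases h; exact ⟨by simp, hdisj⟩
      | cons p ps =>
        rw [pvDfsFold_cons] at h
        simp only [pvDfs] at h
        rw [pvDfsFold_none] at h; cases h
    · intro order c o S h; simp [pvDfs] at h
  | succ fuel ih =>
    have hdfs : ∀ (order : List String) (c : String) (o S : List String), pvDfs dp (fuel+1) order c = some o →
        (∀ x ∈ S, ∃ y ∈ S, y ∈ dp.getD x []) → (∀ x ∈ S, x ∉ order) →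
        c ∉ S ∧ ∀ x ∈ S, x ∉ o := by
      intro order c o S h hS hdisj
      rw [pvDfs_succ] at h
      by_cases hc : c ∈ order
      · rw [if_pos hc] at h; cases h
        exact ⟨fun hcS => hdisj c hcS hc, hdisj⟩
      · rw [if_neg hc] at h
        cases hfold : pvDfsFold dp fuel (dp.getD c []) (some order) with
        | none => rw [hfold] at h; cases h
        | some o2 =>
          rw [hfold] at h; cases h
          obtain ⟨hps, ho2⟩ := ih.1 _ _ _ _ hfold hS hdisj
          have hcS : c ∉ S := by
            intro hcS
            obtain ⟨y, hyS, hy⟩ := hS c hcS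
            exact hps y hy hyS
          refine ⟨hcS, fun x hxS => ?_⟩
          simp only [List.mem_append, List.mem_singleton]
          rintro (hx | rfl)
          · exact ho2 x hxS hx
          · exact hcS hxS
    refine ⟨?_, hdfs⟩
    intro ps order o S h hS hdisj
    induction ps generalizing order with
    | nil => cases h; exact ⟨by simp, hdisj⟩
    | cons p ps ihps =>
      rw [pvDfsFold_cons] at h
      cases hp : pvDfs dp (fuel+1) order p with
      | none => rw [hp, pvDfsFold_none] at h; cases h
      | some o1 =>
        rw [hp] at h
        obtain ⟨hpS, ho1⟩ := hdfs _ _ _ _ hp hS hdisj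
        obtain ⟨hpsS, ho⟩ := ihps _ h ho1
        refine ⟨fun q hq => ?_, ho⟩
        rcases List.mem_cons.1 hq with rfl | hq
        · exact hpS
        · exact hpsS q hq

-- a closed parent walk yields a set in which every node has a parent-successor inside the set
theorem pvWalk_succ (dp : PySem.Dict String (List String)) :
    ∀ (l : List String) (a z : String), pvChain dp a l z →
      ∀ x ∈ a :: l, ∃ y ∈ a :: (l ++ [z]), y ∈ dp.getD x [] := by
  intro l
  induction l with
  | nil =>
    intro a z hch x hx
    rcases List.mem_cons.1 hx with rfl | hx
    · exact ⟨z, by simp, hch⟩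
    · simp at hx
  | cons h t ih =>
    intro a z hch x hx
    rcases List.mem_cons.1 hx with rfl | hx
    · exact ⟨h, by simp, hch.1⟩
    · obtain ⟨y, hy, hyp⟩ := ih h z hch.2 x hx
      refine ⟨y, ?_, hyp⟩
      rcases List.mem_cons.1 hy with rfl | hy
      · simp
      · simp only [List.mem_cons, List.cons_append, List.mem_append] at hy ⊢
        tauto

theorem pvChain_cyc (dp : PySem.Dict String (List String)) (c : String) (l : List String)
    (hch : pvChain dp c l c) :
    ∀ x ∈ c :: l, ∃ y ∈ c :: l, y ∈ dp.getD x [] := by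
  intro x hx
  obtain ⟨y, hy, hyp⟩ := pvWalk_succ dp l c c hch x hx
  refine ⟨y, ?_, hyp⟩
  rcases List.mem_cons.1 hy with rfl | hy
  · exact List.mem_cons.2 (Or.inl rfl)
  · rcases List.mem_append.1 hy with hy | hy
    · exact List.mem_cons_of_mem _ hy
    · simp only [List.mem_singleton] at hy
      exact hy ▸ List.mem_cons.2 (Or.inl rfl)

-- the parents fold of a commit not yet in the order list never appends that commit
theorem pvDfs_nogray (dp : PySem.Dict String (List String)) (fuel : Nat) (order : List String)
    (c : String) (o2 : List String) (hc : c ∉ order)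
    (h : pvDfsFold dp fuel (dp.getD c []) (some order) = some o2) : c ∉ o2 := by
  intro hmem
  rcases (pvDfs_reach dp fuel).1 _ _ _ h c hmem with hord | ⟨-, p, hp, hpo, hcase⟩
  · exact hc hord
  · rcases hcase with rfl | ⟨l, hch, hl⟩
    · have := (pvDfs_cyc dp fuel).1 _ _ _ [c] h
        (by intro x hx; simp only [List.mem_singleton] at hx; exact ⟨c, by simp, hx ▸ hp⟩)
        (by intro x hx; simp only [List.mem_singleton] at hx; exact hx ▸ hc)
      exact this.2 c (by simp) hmem
    · have := (pvDfs_cyc dp fuel).1 _ _ _ (c :: p :: l) h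
        (pvChain_cyc dp c (p :: l) ⟨hp, hch⟩)
        (by
          intro x hx
          rcases List.mem_cons.1 hx with rfl | hx
          · exact hc
          · rcases List.mem_cons.1 hx with rfl | hx
            · exact hpo
            · exact hl x hx)
      exact this.2 c (by simp) hmem

-- the clocks dict built by B's phase 2 over a given order list
def pvMemoOf (dc : PySem.Dict String String) (db : PySem.Dict String Int)
    (dp : PySem.Dict String (List String)) (n : Int) (o : List String) :
    PySem.Dict String (List Int) :=
  o.foldl (pvStepClock dc db dp n) PySem.Dict.empty

theorem pvMemoOf_append (dc : PySem.Dict String String) (db : PySem.Dict String Int)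
    (dp : PySem.Dict String (List String)) (n : Int) (o e : List String) :
    pvMemoOf dc db dp n (o ++ e) = e.foldl (pvStepClock dc db dp n) (pvMemoOf dc db dp n o) := by
  simp [pvMemoOf, List.foldl_append]

theorem pvMemoOf_keys (dc : PySem.Dict String String) (db : PySem.Dict String Int)
    (dp : PySem.Dict String (List String)) (n : Int) (o : List String) :
    (pvMemoOf dc db dp n o).keys = PySem.Set.ofList o := by
  show (o.foldl (fun d x => d.insert x (pvVal dc db dp n d x)) PySem.Dict.empty).keys = _
  rw [PySem.Dict.keys_foldl_insert]
  simp [PySem.Dict.keys_empty, PySem.Set.update_nil_left]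

theorem pvMemoOf_get?_eq_none (dc : PySem.Dict String String) (db : PySem.Dict String Int)
    (dp : PySem.Dict String (List String)) (n : Int) (o : List String) (c : String)
    (hc : c ∉ o) : (pvMemoOf dc db dp n o).get? c = none := by
  rw [PySem.Dict.get?_eq_none_iff_not_mem_keys, pvMemoOf_keys]
  simpa [PySem.Set.mem_ofList] using hc

theorem pvMemoOf_get?_of_mem (dc : PySem.Dict String String) (db : PySem.Dict String Int)
    (dp : PySem.Dict String (List String)) (n : Int) (o : List String) (c : String)
    (hc : c ∈ o) :
    (pvMemoOf dc db dp n o).get? c = some ((pvMemoOf dc db dp n o).getD c []) := by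
  cases hg : (pvMemoOf dc db dp n o).get? c with
  | none =>
    rw [PySem.Dict.get?_eq_none_iff_not_mem_keys, pvMemoOf_keys] at hg
    exact absurd (by simpa [PySem.Set.mem_ofList] using hc) hg
  | some v => rw [PySem.Dict.getD_of_get?_eq_some _ [] hg]

theorem pvFoldStep_getD_stable (dc : PySem.Dict String String) (db : PySem.Dict String Int)
    (dp : PySem.Dict String (List String)) (n : Int) :
    ∀ (e : List String) (d : PySem.Dict String (List Int)) (p : String),
      (∀ x ∈ e, x ≠ p) →
      (e.foldl (pvStepClock dc db dp n) d).getD p [] = d.getD p [] := by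
  intro e
  induction e with
  | nil => intro d p _; rfl
  | cons x e ih =>
    intro d p hp
    rw [List.foldl_cons]
    rw [ih _ p (fun y hy => hp y (List.mem_cons_of_mem _ hy))]
    exact PySem.Dict.getD_insert_of_ne _ _ _ ((hp x (List.mem_cons.2 (Or.inl rfl))).symm)

theorem pvMemoOf_getD_stable (dc : PySem.Dict String String) (db : PySem.Dict String Int)
    (dp : PySem.Dict String (List String)) (n : Int) (o o' : List String) (p : String)
    (hpre : o <+: o') (hnd : o'.Nodup) (hp : p ∈ o) :
    (pvMemoOf dc db dp n o').getD p [] = (pvMemoOf dc db dp n o).getD p [] := by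
  obtain ⟨e, rfl⟩ := hpre
  rw [pvMemoOf_append]
  refine pvFoldStep_getD_stable dc db dp n e _ p ?_
  intro x hx
  rcases List.nodup_append.1 hnd with ⟨-, -, hdisj⟩
  exact (hdisj p hp x hx).symm

theorem pvZipFold_length (d : PySem.Dict String (List Int)) :
    ∀ (ps : List String) (acc : List Int) (m : Nat),
      (∀ q ∈ ps, (d.getD q []).length = m) → acc.length = m →
      (ps.foldl (fun v p => List.zipWith max v (d.getD p [])) acc).length = m := by
  intro ps
  induction ps with
  | nil => intro acc m _ ha; exact ha
  | cons q ps ih =>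
    intro acc m hp ha
    rw [List.foldl_cons]
    refine ih _ m (fun r hr => hp r (List.mem_cons_of_mem _ hr)) ?_
    rw [List.length_zipWith, ha, hp q (List.mem_cons.2 (Or.inl rfl))]
    exact Nat.min_self m

theorem pvVal_length (dc : PySem.Dict String String) (db : PySem.Dict String Int)
    (dp : PySem.Dict String (List String)) (n : Int) (d : PySem.Dict String (List Int))
    (c : String) (hp : ∀ q ∈ dp.getD c [], (d.getD q []).length = n.toNat) :
    (pvVal dc db dp n d c).length = n.toNat := by
  unfold pvVal
  rw [PySem.List.length_pySetD]
  exact pvZipFold_length d _ _ _ hp (List.length_replicate ..)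

theorem pvSize_pos (db : PySem.Dict String Int) (b : String) (h : db.contains b = true) :
    1 ≤ db.size := by
  have hb : b ∈ db.keys := (PySem.Dict.contains_iff_mem_keys _ _).1 h
  have : 0 < db.keys.length := List.length_pos_of_mem hb
  simpa [PySem.Dict.keys, PySem.Dict.size, List.length_map] using this

-- shifting A's index loop across a cons cell
theorem pvShift (b : Int) (vec' : List Int) (w : Int) :
    ∀ (fuelm j m : Nat), m - j ≤ fuelm → ∀ (res : List Int),
      (PySem.List.pyRange (1 + (j : Int)) ((m : Int) + 1) 1).foldl
        (fun r i => if PySem.List.pyGetD (b :: vec') i 0 > PySem.List.pyGetD r i 0 then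
          PySem.List.pySetD r i (PySem.List.pyGetD (b :: vec') i 0) else r) (w :: res)
      = w :: (PySem.List.pyRange (j : Int) (m : Int) 1).foldl
        (fun r i => if PySem.List.pyGetD vec' i 0 > PySem.List.pyGetD r i 0 then
          PySem.List.pySetD r i (PySem.List.pyGetD vec' i 0) else r) res := by
  intro fuelm
  induction fuelm with
  | zero =>
    intro j m hm res
    rw [PySem.List.pyRange_one_eq_nil (a := 1 + (j:Int)) (b := (m:Int) + 1) (by omega),
      PySem.List.pyRange_one_eq_nil (a := (j:Int)) (b := (m:Int)) (by omega)]
    rfl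
  | succ fuelm ih =>
    intro j m hm res
    by_cases hjm : j < m
    · rw [PySem.List.pyRange_one_cons (a := 1 + (j:Int)) (b := (m:Int) + 1) (by omega),
        PySem.List.pyRange_one_cons (a := (j:Int)) (b := (m:Int)) (by omega),
        List.foldl_cons, List.foldl_cons]
      have h1 : (1 : Int) + (j : Int) = ((j + 1 : Nat) : Int) := by push_cast; ring
      have hstep :
          (if PySem.List.pyGetD (b :: vec') (1 + (j:Int)) 0 > PySem.List.pyGetD (w :: res) (1 + (j:Int)) 0 then
            PySem.List.pySetD (w :: res) (1 + (j:Int)) (PySem.List.pyGetD (b :: vec') (1 + (j:Int)) 0)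
          else w :: res)
          = w :: (if PySem.List.pyGetD vec' (j:Int) 0 > PySem.List.pyGetD res (j:Int) 0 then
            PySem.List.pySetD res (j:Int) (PySem.List.pyGetD vec' (j:Int) 0) else res) := by
        simp only [h1, PySem.List.pyGetD_natCast, PySem.List.pySetD_natCast,
          List.getD_cons_succ, List.set_cons_succ]
        split_ifs with h
        · rfl
        · rfl
      rw [hstep]
      have h2 : (1 : Int) + (j : Int) + 1 = 1 + ((j + 1 : Nat) : Int) := by push_cast; ring
      have h3 : (j : Int) + 1 = ((j + 1 : Nat) : Int) := by push_cast; ring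
      rw [h2, h3, ih (j+1) m (by omega)]
    · rw [PySem.List.pyRange_one_eq_nil (a := 1 + (j:Int)) (b := (m:Int) + 1) (by omega),
        PySem.List.pyRange_one_eq_nil (a := (j:Int)) (b := (m:Int)) (by omega)]
      rfl

-- A's index loop over one vector is the pointwise max
theorem pvInner_eq : ∀ (m : Nat) (vec res : List Int), res.length = m → vec.length = m →
    (PySem.List.pyRange 0 (m : Int) 1).foldl
      (fun r i => if PySem.List.pyGetD vec i 0 > PySem.List.pyGetD r i 0 then
        PySem.List.pySetD r i (PySem.List.pyGetD vec i 0) else r) res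
    = List.zipWith max res vec := by
  intro m
  induction m with
  | zero =>
    intro vec res hr hv
    rw [List.length_eq_zero_iff] at hr hv
    subst hr; subst hv
    rw [PySem.List.pyRange_one_eq_nil (a := 0) (b := ((0:Nat):Int)) (by simp)]
    rfl
  | succ m ih =>
    intro vec res hr hv
    cases res with
    | nil => simp at hr
    | cons a res' =>
    cases vec with
    | nil => simp at hv
    | cons b vec' =>
      simp only [List.length_cons, Nat.succ_inj] at hr hv
      have hcast : ((m + 1 : Nat) : Int) = (m : Int) + 1 := by push_cast; ring
      rw [hcast, PySem.List.pyRange_one_cons (a := 0) (b := (m:Int) + 1) (by omega), List.foldl_cons]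
      have hfirst :
          (if PySem.List.pyGetD (b :: vec') 0 0 > PySem.List.pyGetD (a :: res') 0 0 then
            PySem.List.pySetD (a :: res') 0 (PySem.List.pyGetD (b :: vec') 0 0)
          else a :: res') = max a b :: res' := by
        rw [PySem.List.pyGetD_zero_cons, PySem.List.pyGetD_zero_cons]
        split_ifs with h
        · rw [PySem.List.pySetD_of_nonneg _ _ le_rfl]
          simp [max_eq_right h.le]
        · simp [max_eq_left (not_lt.1 h)]
      rw [hfirst]
      have h01 : (0 : Int) + 1 = 1 + ((0 : Nat) : Int) := by norm_num
      rw [h01, pvShift b vec' (max a b) m 0 m (by omega) res']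
      have h00 : ((0 : Nat) : Int) = (0 : Int) := by norm_num
      rw [h00, ih vec' res' hr hv]
      simp [List.zipWith]

-- A's elementwise_max is B's zip/max fold, for non-empty equal-length vectors
theorem pvEmax_eq (pcs : List (List Int)) (m : Nat) (hne : pcs ≠ [])
    (hl : ∀ v ∈ pcs, v.length = m) :
    pvEmax pcs = pcs.foldl (fun a v => List.zipWith max a v) (List.replicate m 0) := by
  cases pcs with
  | nil => exact absurd rfl hne
  | cons v0 rest =>
    have hv0 : v0.length = m := hl v0 (List.mem_cons.2 (Or.inl rfl))
    unfold pvEmax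
    rw [if_neg (by simp)]
    simp only [PySem.List.pyGetD_zero_cons, PySem.List.len_eq, hv0, Int.toNat_natCast]
    -- now prove the generic fold equality
    have main : ∀ (vs : List (List Int)) (res : List Int), res.length = m →
        (∀ v ∈ vs, v.length = m) →
        vs.foldl (fun result vec => (PySem.List.pyRange 0 (m : Int) 1).foldl
          (fun result i => if PySem.List.pyGetD vec i 0 > PySem.List.pyGetD result i 0 then
            PySem.List.pySetD result i (PySem.List.pyGetD vec i 0) else result) result) res
        = vs.foldl (fun a v => List.zipWith max a v) res := by
      intro vs
      induction vs with
      | nil => intro res _ _; rfl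
      | cons v vs ihv =>
        intro res hres hvs
        rw [List.foldl_cons, List.foldl_cons,
          pvInner_eq m v res hres (hvs v (List.mem_cons.2 (Or.inl rfl)))]
        exact ihv _ (by rw [List.length_zipWith, hres, hvs v (List.mem_cons.2 (Or.inl rfl))]; exact Nat.min_self m)
          (fun w hw => hvs w (List.mem_cons_of_mem _ hw))
    exact main (v0 :: rest) (List.replicate m 0) (List.length_replicate ..) hl

-- the lockstep theorem: A's memoized recursion simulates B's order DFS, with the memo dict
-- always equal to B's phase-2 rebuild of the current order list
theorem pvLockstep (dc : PySem.Dict String String) (db : PySem.Dict String Int)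
    (dp : PySem.Dict String (List String)) (n : Int) (hn : n = (db.size : Int))
    (HB : ∀ c ∈ dc.keys, db.contains (dc.getD c "") = true)
    (HP : ∀ c ∈ dc.keys, ∀ p ∈ dp.getD c [], p ∈ dc.keys) :
    ∀ (fuel : Nat),
    (∀ (ps order : List String) (vs : List (List Int)),
      (∀ p ∈ ps, p ∈ dc.keys) → order.Nodup → (∀ x ∈ order, x ∈ dc.keys) →
      (∀ x ∈ order, ((pvMemoOf dc db dp n order).getD x []).length = n.toNat) →
      pvAFold dc db dp n fuel ps (some (pvMemoOf dc db dp n order, vs))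
        = (pvDfsFold dp fuel ps (some order)).map
            (fun o => (pvMemoOf dc db dp n o,
              vs ++ ps.map (fun p => (pvMemoOf dc db dp n o).getD p []))) ∧
      (∀ o, pvDfsFold dp fuel ps (some order) = some o → order <+: o ∧ o.Nodup ∧
        (∀ x ∈ o, x ∈ dc.keys) ∧
        (∀ x ∈ o, ((pvMemoOf dc db dp n o).getD x []).length = n.toNat) ∧ ∀ p ∈ ps, p ∈ o)) ∧
    (∀ (order : List String) (c : String),
      c ∈ dc.keys → order.Nodup → (∀ x ∈ order, x ∈ dc.keys) →
      (∀ x ∈ order, ((pvMemoOf dc db dp n order).getD x []).length = n.toNat) →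
      pvClockA dc db dp n fuel (pvMemoOf dc db dp n order) c
        = (pvDfs dp fuel order c).map
            (fun o => (pvMemoOf dc db dp n o, (pvMemoOf dc db dp n o).getD c [])) ∧
      (∀ o, pvDfs dp fuel order c = some o → order <+: o ∧ o.Nodup ∧
        (∀ x ∈ o, x ∈ dc.keys) ∧
        (∀ x ∈ o, ((pvMemoOf dc db dp n o).getD x []).length = n.toNat) ∧ c ∈ o)) := by
  intro fuel
  induction fuel with
  | zero =>
    constructor
    · intro ps order vs hps hnd hsub hlen
      cases ps with
      | nil =>
        refine ⟨by simp [pvAFold, pvDfsFold], ?_⟩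
        intro o ho; cases ho
        exact ⟨List.prefix_refl _, hnd, hsub, hlen, by simp⟩
      | cons p ps =>
        rw [pvAFold_cons, pvDfsFold_cons,
          show pvClockA dc db dp n 0 (pvMemoOf dc db dp n order) p = none from rfl,
          show pvDfs dp 0 order p = none from rfl]
        rw [show ((none : Option (PySem.Dict String (List Int) × List Int)).map
          (fun r => (r.1, vs ++ [r.2]))) = none from rfl]
        rw [pvAFold_none, pvDfsFold_none]
        exact ⟨rfl, by intro o ho; cases ho⟩
    · intro order c _ _ _ _
      rw [show pvClockA dc db dp n 0 (pvMemoOf dc db dp n order) c = none from rfl,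
        show pvDfs dp 0 order c = none from rfl]
      exact ⟨rfl, by intro o ho; cases ho⟩
  | succ fuel IH =>
    have hdfs : ∀ (order : List String) (c : String),
        c ∈ dc.keys → order.Nodup → (∀ x ∈ order, x ∈ dc.keys) →
        (∀ x ∈ order, ((pvMemoOf dc db dp n order).getD x []).length = n.toNat) →
        pvClockA dc db dp n (fuel+1) (pvMemoOf dc db dp n order) c
          = (pvDfs dp (fuel+1) order c).map
              (fun o => (pvMemoOf dc db dp n o, (pvMemoOf dc db dp n o).getD c [])) ∧
        (∀ o, pvDfs dp (fuel+1) order c = some o → order <+: o ∧ o.Nodup ∧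
          (∀ x ∈ o, x ∈ dc.keys) ∧
          (∀ x ∈ o, ((pvMemoOf dc db dp n o).getD x []).length = n.toNat) ∧ c ∈ o) := by
      intro order c hcK hnd hsub hlen
      rw [pvClockA_succ, pvDfs_succ]
      by_cases hco : c ∈ order
      · simp only [pvMemoOf_get?_of_mem dc db dp n order c hco, if_pos hco]
        refine ⟨rfl, ?_⟩
        intro o ho; injection ho with ho; subst ho
        exact ⟨List.prefix_refl _, hnd, hsub, hlen, hco⟩
      · simp only [pvMemoOf_get?_eq_none dc db dp n order c hco, if_neg hco]
        by_cases hps : dp.getD c [] = []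
        · -- no parents: base clock
          have hfold0 : pvDfsFold dp fuel (dp.getD c []) (some order) = some order := by
            rw [hps]; rfl
          simp only [if_pos hps, hfold0]
          have hmemo : pvMemoOf dc db dp n (order ++ [c])
              = (pvMemoOf dc db dp n order).insert c
                  (pvVal dc db dp n (pvMemoOf dc db dp n order) c) := by
            rw [pvMemoOf_append]; rfl
          have hval : pvVal dc db dp n (pvMemoOf dc db dp n order) c
              = pvBaseVal dc db n c := by
            unfold pvVal pvBaseVal
            rw [hps]
            rfl
          have hnd' : (order ++ [c]).Nodup := by
            rw [List.nodup_append]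
            refine ⟨hnd, List.nodup_singleton _, ?_⟩
            intro a ha bb hbb
            rw [List.mem_singleton] at hbb
            subst hbb
            intro h; subst h; exact hco ha
          constructor
          · simp only [Option.map_some, hmemo, hval, PySem.Dict.getD_insert_self]
          · intro o ho
            injection ho with ho; subst ho
            refine ⟨List.prefix_append _ _, hnd', ?_, ?_, by simp⟩
            · intro x hx
              rcases List.mem_append.1 hx with hx | hx
              · exact hsub x hx
              · rw [List.mem_singleton] at hx; subst hx; exact hcK
            · intro x hx
              rw [hmemo]
              rcases List.mem_append.1 hx with hx' | hx'
              · rw [PySem.Dict.getD_insert_of_ne _ _ _ (by intro h; subst h; exact hco hx')]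
                exact hlen x hx'
              · rw [List.mem_singleton] at hx'; subst hx'
                rw [PySem.Dict.getD_insert_self]
                refine pvVal_length dc db dp n _ x ?_
                rw [hps]; intro q hq; cases hq
        · -- parents present
          simp only [if_neg hps]
          obtain ⟨heq, hinv⟩ := (IH).1 (dp.getD c []) order []
            (HP c hcK) hnd hsub hlen
          cases hfold : pvDfsFold dp fuel (dp.getD c []) (some order) with
          | none =>
            rw [hfold] at heq
            rw [heq]
            exact ⟨rfl, by intro o ho; cases ho⟩
          | some o2 =>
            rw [hfold] at heq hinv
            obtain ⟨hpre2, hnd2, hsub2, hlen2, hpin⟩ := hinv o2 rfl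
            rw [heq]
            simp only [Option.map_some, List.nil_append]
            have hco2 : c ∉ o2 := pvDfs_nogray dp fuel order c o2 hco hfold
            have hlenp : ∀ q ∈ dp.getD c [],
                (((pvMemoOf dc db dp n o2).getD q []).length) = n.toNat :=
              fun q hq => hlen2 q (hpin q hq)
            have hpcs : ∀ v ∈ (dp.getD c []).map
                (fun p => (pvMemoOf dc db dp n o2).getD p []), v.length = n.toNat := by
              intro v hv
              obtain ⟨q, hq, rfl⟩ := List.mem_map.1 hv
              exact hlenp q hq
            have hemax : pvEmax ((dp.getD c []).map (fun p => (pvMemoOf dc db dp n o2).getD p []))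
                = (dp.getD c []).foldl
                    (fun v p => List.zipWith max v ((pvMemoOf dc db dp n o2).getD p []))
                    (List.replicate n.toNat 0) := by
              rw [pvEmax_eq _ n.toNat (by simpa using hps) hpcs, List.foldl_map]
            have hlen0 : (pvEmax ((dp.getD c []).map
                (fun p => (pvMemoOf dc db dp n o2).getD p []))).length = n.toNat := by
              rw [hemax]
              exact pvZipFold_length _ _ _ _ hlenp (List.length_replicate ..)
            have hnpos : 1 ≤ n.toNat := by
              have h1 := pvSize_pos db (dc.getD c "") (HB c hcK)
              rw [hn]
              simpa using h1
            have hlenne : ¬ (PySem.List.len (pvEmax ((dp.getD c []).map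
                (fun p => (pvMemoOf dc db dp n o2).getD p []))) = 0) := by
              rw [PySem.List.len_eq, hlen0]
              omega
            have hmemo : pvMemoOf dc db dp n (o2 ++ [c])
                = (pvMemoOf dc db dp n o2).insert c
                    (pvVal dc db dp n (pvMemoOf dc db dp n o2) c) := by
              rw [pvMemoOf_append]; rfl
            have hval : pvMaxVal dc db n c ((dp.getD c []).map
                  (fun p => (pvMemoOf dc db dp n o2).getD p []))
                = pvVal dc db dp n (pvMemoOf dc db dp n o2) c := by
              unfold pvMaxVal pvVal
              rw [if_neg hlenne, hemax]
            have hnd' : (o2 ++ [c]).Nodup := by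
              rw [List.nodup_append]
              refine ⟨hnd2, List.nodup_singleton _, ?_⟩
              intro a ha bb hbb
              rw [List.mem_singleton] at hbb
              subst hbb
              intro h; subst h; exact hco2 ha
            constructor
            · simp only [hval, hmemo, PySem.Dict.getD_insert_self]
            · intro o ho
              injection ho with ho; subst ho
              refine ⟨hpre2.trans (List.prefix_append _ _), hnd', ?_, ?_, by simp⟩
              · intro x hx
                rcases List.mem_append.1 hx with hx | hx
                · exact hsub2 x hx
                · rw [List.mem_singleton] at hx; subst hx; exact hcK
              · intro x hx
                rw [hmemo]
                rcases List.mem_append.1 hx with hx' | hx'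
                · rw [PySem.Dict.getD_insert_of_ne _ _ _ (by intro h; subst h; exact hco2 hx')]
                  exact hlen2 x hx'
                · rw [List.mem_singleton] at hx'; subst hx'
                  rw [PySem.Dict.getD_insert_self]
                  exact pvVal_length dc db dp n _ x hlenp
    refine ⟨?_, hdfs⟩
    intro ps
    induction ps with
    | nil =>
      intro order vs hps hnd hsub hlen
      refine ⟨by simp [pvAFold, pvDfsFold], ?_⟩
      intro o ho; cases ho
      exact ⟨List.prefix_refl _, hnd, hsub, hlen, by simp⟩
    | cons p ps ihps =>
      intro order vs hps hnd hsub hlen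
      have hpK : p ∈ dc.keys := hps p (List.mem_cons.2 (Or.inl rfl))
      obtain ⟨heqp, hinvp⟩ := hdfs order p hpK hnd hsub hlen
      rw [pvAFold_cons, pvDfsFold_cons, heqp]
      cases hp : pvDfs dp (fuel+1) order p with
      | none =>
        simp only [Option.map_none, pvAFold_none, pvDfsFold_none]
        exact ⟨trivial, by intro o ho; cases ho⟩
      | some o1 =>
        obtain ⟨hpre1, hnd1, hsub1, hlen1, hpo1⟩ := hinvp o1 hp
        simp only [Option.map_some]
        obtain ⟨heq', hinv'⟩ := ihps o1 (vs ++ [(pvMemoOf dc db dp n o1).getD p []])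
          (fun q hq => hps q (List.mem_cons_of_mem _ hq)) hnd1 hsub1 hlen1
        rw [heq']
        constructor
        · cases hfold2 : pvDfsFold dp (fuel+1) ps (some o1) with
          | none => rfl
          | some o =>
            obtain ⟨hpre', hnd', hsub', hlen', hpsin'⟩ := hinv' o hfold2
            simp only [Option.map_some, List.map_cons]
            have hstab : (pvMemoOf dc db dp n o).getD p []
                = (pvMemoOf dc db dp n o1).getD p [] :=
              pvMemoOf_getD_stable dc db dp n o1 o p hpre' hnd' hpo1
            rw [hstab]
            simp
        · intro o ho
          obtain ⟨hpre', hnd', hsub', hlen', hpsin'⟩ := hinv' o ho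
          refine ⟨hpre1.trans hpre', hnd', hsub', hlen', ?_⟩
          intro q hq
          rcases List.mem_cons.1 hq with rfl | hq
          · exact hpre'.subset hpo1
          · exact hpsin' q hq

-- the top-level loop over the commits of commit_to_branch
def pvTopAFold (dc : PySem.Dict String String) (db : PySem.Dict String Int)
    (dp : PySem.Dict String (List String)) (n : Int) (F : Nat) (cs : List String)
    (acc : Option (PySem.Dict String (List Int))) : Option (PySem.Dict String (List Int)) :=
  cs.foldl (fun acc c => acc.bind fun memo => (pvClockA dc db dp n F memo c).map Prod.fst) acc

theorem pvTopAFold_none (dc : PySem.Dict String String) (db : PySem.Dict String Int)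
    (dp : PySem.Dict String (List String)) (n : Int) (F : Nat) (cs : List String) :
    pvTopAFold dc db dp n F cs none = none := by
  induction cs with
  | nil => rfl
  | cons c cs ih => simpa [pvTopAFold] using ih

theorem pvTopAFold_cons (dc : PySem.Dict String String) (db : PySem.Dict String Int)
    (dp : PySem.Dict String (List String)) (n : Int) (F : Nat) (c : String) (cs : List String)
    (memo : PySem.Dict String (List Int)) :
    pvTopAFold dc db dp n F (c :: cs) (some memo)
      = pvTopAFold dc db dp n F cs ((pvClockA dc db dp n F memo c).map Prod.fst) := rfl

theorem pvTop (dc : PySem.Dict String String) (db : PySem.Dict String Int)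
    (dp : PySem.Dict String (List String)) (n : Int) (hn : n = (db.size : Int))
    (HB : ∀ c ∈ dc.keys, db.contains (dc.getD c "") = true)
    (HP : ∀ c ∈ dc.keys, ∀ p ∈ dp.getD c [], p ∈ dc.keys) (F : Nat) :
    ∀ (cs : List String), (∀ c ∈ cs, c ∈ dc.keys) → ∀ (order : List String),
      order.Nodup → (∀ x ∈ order, x ∈ dc.keys) →
      (∀ x ∈ order, ((pvMemoOf dc db dp n order).getD x []).length = n.toNat) →
      pvTopAFold dc db dp n F cs (some (pvMemoOf dc db dp n order))
        = (pvDfsFold dp F cs (some order)).map (fun o => pvMemoOf dc db dp n o) := by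
  intro cs
  induction cs with
  | nil => intro _ order _ _ _; rfl
  | cons c cs ih =>
    intro hcs order hnd hsub hlen
    have hcK : c ∈ dc.keys := hcs c (List.mem_cons.2 (Or.inl rfl))
    obtain ⟨heqc, hinvc⟩ := (pvLockstep dc db dp n hn HB HP F).2 order c hcK hnd hsub hlen
    rw [pvTopAFold_cons, pvDfsFold_cons, heqc]
    cases hc : pvDfs dp F order c with
    | none =>
      simp only [Option.map_none, pvTopAFold_none, pvDfsFold_none]
    | some o1 =>
      obtain ⟨hpre1, hnd1, hsub1, hlen1, hco1⟩ := hinvc o1 hc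
      simp only [Option.map_some]
      exact ih (fun q hq => hcs q (List.mem_cons_of_mem _ hq)) o1 hnd1 hsub1 hlen1

-- the two ports, written with the named folds (definitional)
theorem pvPortA_eq (branch_to_index : List (String × Int)) (commit_to_branch : List (String × String)) (commit_to_parents : List (String × List String)) :
    compute_vector_clocks branch_to_index commit_to_branch commit_to_parents
      = match pvTopAFold (PySem.Dict.ofList commit_to_branch) (PySem.Dict.ofList branch_to_index)
          (PySem.Dict.ofList commit_to_parents) ((PySem.Dict.ofList branch_to_index).size : Int)
          ((PySem.Dict.ofList commit_to_branch).size + 1)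
          (PySem.Dict.ofList commit_to_branch).keys (some PySem.Dict.empty) with
        | none => []
        | some memo => memo.items := rfl

theorem pvPortB_eq (branch_to_index : List (String × Int)) (commit_to_branch : List (String × String)) (commit_to_parents : List (String × List String)) :
    compute_vector_clocks_alt branch_to_index commit_to_branch commit_to_parents
      = match pvDfsFold (PySem.Dict.ofList commit_to_parents)
          ((PySem.Dict.ofList commit_to_branch).size + 1)
          (PySem.Dict.ofList commit_to_branch).keys (some []) with
        | none => []
        | some order => (pvMemoOf (PySem.Dict.ofList commit_to_branch)
            (PySem.Dict.ofList branch_to_index) (PySem.Dict.ofList commit_to_parents)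
            ((PySem.Dict.ofList branch_to_index).size : Int) order).items := rfl

-- ===== VERDICT (by name: the statement is the Claim_ definition above) =====
theorem compute_vector_clocks_spec : Claim_equal_compute_vector_clocks := by
  intro b2i c2b c2p _hdom hpre
  unfold Spec_compute_vector_clocks
  have HB : ∀ c ∈ (PySem.Dict.ofList c2b).keys,
      (PySem.Dict.ofList b2i).contains ((PySem.Dict.ofList c2b).getD c "") = true :=
    fun c hc => (hpre c hc).1
  have HP : ∀ c ∈ (PySem.Dict.ofList c2b).keys,
      ∀ p ∈ (PySem.Dict.ofList c2p).getD c [], p ∈ (PySem.Dict.ofList c2b).keys :=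
    fun c hc p hp => (PySem.Dict.contains_iff_mem_keys _ _).1 ((hpre c hc).2.2.1 p hp)
  have htop := pvTop (PySem.Dict.ofList c2b) (PySem.Dict.ofList b2i) (PySem.Dict.ofList c2p)
    ((PySem.Dict.ofList b2i).size : Int) rfl HB HP ((PySem.Dict.ofList c2b).size + 1)
    (PySem.Dict.ofList c2b).keys (fun c hc => hc) [] List.nodup_nil
    (by intro x hx; cases hx) (by intro x hx; cases hx)
  rw [pvPortA_eq, pvPortB_eq]
  have hempty : pvMemoOf (PySem.Dict.ofList c2b) (PySem.Dict.ofList b2i) (PySem.Dict.ofList c2p)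
      ((PySem.Dict.ofList b2i).size : Int) [] = PySem.Dict.empty := rfl
  rw [hempty] at htop
  rw [htop]
  cases pvDfsFold (PySem.Dict.ofList c2p) ((PySem.Dict.ofList c2b).size + 1)
      (PySem.Dict.ofList c2b).keys (some []) with
  | none => rfl
  | some o => rfl
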